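-- pv_equiv track=rewrite | github.com/CASCI-lab/CANA | cana/utils.py | flip_binstate_bit_set
-- ===== SOURCE A (Python) =====
-- import copy
--
-- def flip_bit(bit):
-- 	"""Flips the binary value of a state.
--
-- 	Args:
-- 		bit (string/int/bool): The current bit position
--
-- 	Returns:
-- 		same as input: The flipped bit
-- 	"""
-- 	if isinstance(bit, str):
-- 		return '0' if (bit=='1') else '1'
-- 	elif isinstance(bit, int) or isintance(bit, bool):
-- 		return 0 if (bit == 1) else 1
-- 	else:
-- 		raise TypeError("'bit' type format must be either 'string', 'int' or 'boolean'")
--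
-- def flip_binstate_bit(binstate, idx):
-- 	"""Flips the binary value of a bit in a binary state.
-- 		Args:
-- 			binstate (string) : A string of binary states.
-- 			idx (int) : The index of the bit to flip.
-- 		Returns:
-- 			(string) : New binary state.
--
-- 		Example:
--
-- 			.. code-block:: python
-- 				flip_bit_in_strstates('000',1) -> '010'
-- 		"""
-- 	if idx+1 > len(binstate):
-- 		raise TypeError("Binary state '{}' length and index position '{}' mismatch.".format(binstate, idx))
-- 	return binstate[:idx] + flip_bit(binstate[idx]) + binstate[idx+1:]
--
-- def flip_binstate_bit_set(binstate, idxs):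
-- 	"""Flips the binary value for a set of bits in a binary state.
--
-- 	Args:
-- 		binstate (string) : The binary state to flip.
-- 		idxs (int) : The indexes of the bits to flip.
--
-- 	Returns:
-- 		(list) : The flipped states
-- 	"""
-- 	flipset = []
-- 	if (len(idxs) != 0):
-- 		fb = idxs.pop()
-- 		flipset.extend(flip_binstate_bit_set(binstate, copy.copy(idxs) ) )
-- 		flipset.extend(flip_binstate_bit_set(flip_binstate_bit(binstate, fb), copy.copy(idxs) ) )
-- 	else:
-- 		flipset.append(binstate)
-- 	return flipset
-- ===== SOURCE B (Python) =====
-- def flip_bit(bit):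
--     if isinstance(bit, str):
--         return '0' if (bit == '1') else '1'
--     elif isinstance(bit, int) or isinstance(bit, bool):
--         return 0 if (bit == 1) else 1
--     else:
--         raise TypeError("'bit' type format must be either 'string', 'int' or 'boolean'")
--
-- def flip_binstate_bit(binstate, idx):
--     if idx + 1 > len(binstate):
--         raise TypeError("Binary state '{}' length and index position '{}' mismatch.".format(binstate, idx))
--     return binstate[:idx] + flip_bit(binstate[idx]) + binstate[idx+1:]
--
-- def flip_binstate_bit_set(binstate, idxs):
--     """Enumerate all 2**k states obtained by flipping any subset of the given bits,
--     by counting i from 0 to 2**k - 1 and flipping the bits selected by i's binary digits."""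
--     k = len(idxs)
--     out = []
--     for i in range(2 ** k):
--         s = binstate
--         for j in reversed(range(k)):
--             if (i >> j) & 1:
--                 s = flip_binstate_bit(s, idxs[j])
--         out.append(s)
--     return out
-- ===== Notes on version B (the rewrite author's own statement) =====
-- stated objective: idiomatic
-- what changed: Replaces the exponential binary recursion with copy.copy by a single iterative binary-counter loop: output i is built by flipping exactly the bits whose positions are set in i; B does not mutate the caller's idxs list (A pops one element), the claim is about return values.
import Mathlib
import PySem

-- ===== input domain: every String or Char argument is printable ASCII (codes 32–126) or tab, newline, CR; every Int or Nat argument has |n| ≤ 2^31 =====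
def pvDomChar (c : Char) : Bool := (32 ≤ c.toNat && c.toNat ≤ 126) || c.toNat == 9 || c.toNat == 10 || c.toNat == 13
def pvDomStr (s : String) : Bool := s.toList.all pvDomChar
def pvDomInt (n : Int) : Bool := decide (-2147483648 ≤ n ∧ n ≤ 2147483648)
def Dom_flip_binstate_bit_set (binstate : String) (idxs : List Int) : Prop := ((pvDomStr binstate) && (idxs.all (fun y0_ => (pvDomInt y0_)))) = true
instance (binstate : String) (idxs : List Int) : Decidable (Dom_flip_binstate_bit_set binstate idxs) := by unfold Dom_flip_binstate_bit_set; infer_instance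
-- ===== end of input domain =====

-- B replaces A's exponential copy-and-recurse scheme by one iterative binary-counter loop
-- (output i flips exactly the bits set in i); same return values, proved here about the
-- RETURN value only: A additionally pops one element from the caller's idxs list, B does not mutate it.

-- ===== PORT A =====
-- module helper flip_bit (str branch; the int branch is unreachable for a str binstate)
def pvFlipBit (bit : String) : String := if bit = "1" then "0" else "1"

-- module helper flip_binstate_bit; none = the TypeError/IndexError it raises
def pvFlipBinstateBit (binstate : String) (idx : Int) : Option String :=
  if idx + 1 > (PySem.Str.len binstate : Int) then none
  else
    match PySem.Str.pyGet? binstate idx with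
    | none => none
    | some c =>
        some (PySem.Str.slice binstate none (some idx) ++ pvFlipBit (String.ofList [c])
              ++ PySem.Str.slice binstate (some (idx + 1)) none)

-- A's recursion; Python pops the LAST element, so we recurse on the reversed list:
-- the head of `rev` is the popped fb, its tail is copy.copy(idxs) after the pop.
def pvAuxA (binstate : String) (rev : List Int) : Option (List String) :=
  match rev with
  | [] => some [binstate]
  | fb :: rest =>
      match pvAuxA binstate rest with
      | none => none
      | some l =>
          match pvFlipBinstateBit binstate fb with
          | none => none
          | some f =>
              match pvAuxA f rest with
              | none => none
              | some r => some (l ++ r)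

def flip_binstate_bit_set (binstate : String) (idxs : List Int) : List String :=
  (pvAuxA binstate idxs.reverse).getD []

-- ===== PORT B =====
-- Source B's inner loop `for j in reversed(range(k)): if (i >> j) & 1: s = flip(...)`:
-- consuming idxs.reverse, the head is idxs[j] for the current highest j = rest.length.
def pvChain (s : String) (revbits : List Int) (i : Nat) : Option String :=
  match revbits with
  | [] => some s
  | fb :: rest =>
      if Nat.testBit i rest.length then
        match pvFlipBinstateBit s fb with
        | none => none
        | some f => pvChain f rest i
      else pvChain s rest i

def flip_binstate_bit_set_alt (binstate : String) (idxs : List Int) : List String :=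
  ((List.range (2 ^ idxs.length)).mapM (fun i => pvChain binstate idxs.reverse i)).getD []

-- ===== PRECONDITION & SPEC =====
-- Pre_ excludes exactly the inputs where Python A raises (TypeError/IndexError from
-- flip_binstate_bit on an index outside [-len, len-1], or any index on an empty string).
def Pre_flip_binstate_bit_set (binstate : String) (idxs : List Int) : Prop :=
  idxs = [] ∨ (0 < PySem.Str.len binstate ∧
    ∀ i ∈ idxs, -(PySem.Str.len binstate : Int) ≤ i ∧ i < (PySem.Str.len binstate : Int))
instance (binstate : String) (idxs : List Int) : Decidable (Pre_flip_binstate_bit_set binstate idxs) := by unfold Pre_flip_binstate_bit_set; infer_instance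

def pvWitness_flip_binstate_bit_set : String × List Int := ("010", [2, 0, -1])

def Spec_flip_binstate_bit_set (binstate : String) (idxs : List Int) (out : List String) : Prop := out = flip_binstate_bit_set_alt binstate idxs
instance (binstate : String) (idxs : List Int) (out : List String) : Decidable (Spec_flip_binstate_bit_set binstate idxs out) := by unfold Spec_flip_binstate_bit_set; infer_instance

-- ===== CLAIM (what is proved, stated in full; the proofs are below) =====
def Claim_equal_flip_binstate_bit_set : Prop := ∀ (binstate : String) (idxs : List Int), Dom_flip_binstate_bit_set binstate idxs → Pre_flip_binstate_bit_set binstate idxs → Spec_flip_binstate_bit_set binstate idxs (flip_binstate_bit_set binstate idxs)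

-- ===== LEMMAS AND PROOFS =====

-- pvChain only reads bits of i below revbits.length, so adding 2^n on top changes nothing
lemma pvChain_add_two_pow (revbits : List Int) (s : String) (j n : Nat)
    (h : revbits.length ≤ n) : pvChain s revbits (2 ^ n + j) = pvChain s revbits j := by
  induction revbits generalizing s with
  | nil => rfl
  | cons fb rest ih =>
      simp only [List.length_cons] at h
      have hb : Nat.testBit (2 ^ n + j) rest.length = Nat.testBit j rest.length := by
        have : rest.length < n := by omega
        simpa using Nat.testBit_two_pow_add_gt this j
      simp only [pvChain, hb]
      by_cases ht : Nat.testBit j rest.length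
      · simp only [ht, if_true]
        cases pvFlipBinstateBit s fb with
        | none => rfl
        | some f => exact ih f (by omega)
      · simp only [ht]
        exact ih s (by omega)

lemma mapM_congr_mem {α β : Type} (f g : α → Option β) (l : List α)
    (h : ∀ x ∈ l, f x = g x) : l.mapM f = l.mapM g := by
  induction l with
  | nil => rfl
  | cons a t ih =>
      simp only [List.mapM_cons, h a (by simp)]
      rw [ih (fun x hx => h x (by simp [hx]))]

lemma mapM_const_none {α β : Type} (l : List α) (hl : l ≠ []) :
    l.mapM (fun _ => (none : Option β)) = none := by
  cases l with
  | nil => exact absurd rfl hl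
  | cons a t => simp [List.mapM_cons]

-- A's recursion equals B's binary-counter enumeration, as Options (both none exactly
-- where the shared flip helper fails somewhere in the tree)
lemma pvAuxA_eq_mapM (rev : List Int) (s : String) :
    pvAuxA s rev = (List.range (2 ^ rev.length)).mapM (fun i => pvChain s rev i) := by
  induction rev generalizing s with
  | nil => rfl
  | cons fb rest ih =>
      have hlen : 2 ^ (fb :: rest).length = 2 ^ rest.length + 2 ^ rest.length := by
        simp [List.length_cons, pow_succ]; ring
      rw [hlen, List.range_add, List.mapM_append, List.mapM_map]
      have hlow : (List.range (2 ^ rest.length)).mapM (fun i => pvChain s (fb :: rest) i)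
          = (List.range (2 ^ rest.length)).mapM (fun i => pvChain s rest i) := by
        apply mapM_congr_mem
        intro i hi
        have : Nat.testBit i rest.length = false :=
          Nat.testBit_lt_two_pow (List.mem_range.mp hi)
        simp [pvChain, this]
      have hhigh : (List.range (2 ^ rest.length)).mapM
            ((fun i => pvChain s (fb :: rest) i) ∘ (fun j => 2 ^ rest.length + j))
          = (List.range (2 ^ rest.length)).mapM (fun j =>
              match pvFlipBinstateBit s fb with
              | none => none
              | some f => pvChain f rest j) := by
        apply mapM_congr_mem
        intro j hj
        have hset : Nat.testBit (2 ^ rest.length + j) rest.length = true := by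
          have hjlt : j < 2 ^ rest.length := List.mem_range.mp hj
          simpa [Nat.testBit_lt_two_pow hjlt] using
            Nat.testBit_two_pow_add_eq j rest.length
        simp only [Function.comp, pvChain, hset, if_true]
        cases pvFlipBinstateBit s fb with
        | none => rfl
        | some f => exact pvChain_add_two_pow rest f j rest.length le_rfl
      rw [hlow, hhigh]
      simp only [pvAuxA, ih s]
      cases hL : (List.range (2 ^ rest.length)).mapM (fun i => pvChain s rest i) with
      | none => simp
      | some l =>
          cases hF : pvFlipBinstateBit s fb with
          | none =>
              have hne : List.range (2 ^ rest.length) ≠ [] := by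
                have := Nat.two_pow_pos rest.length
                simp only [ne_eq, List.range_eq_nil]
                omega
              simp [mapM_const_none _ hne]
          | some f =>
              simp only [ih]
              cases (List.range (2 ^ rest.length)).mapM (fun i => pvChain f rest i) with
              | none => simp
              | some r => simp

-- ===== VERDICT (by name: the statement is the Claim_ definition above) =====
theorem flip_binstate_bit_set_spec : Claim_equal_flip_binstate_bit_set := by
  intro binstate idxs _ _
  unfold Spec_flip_binstate_bit_set flip_binstate_bit_set flip_binstate_bit_set_alt
  rw [pvAuxA_eq_mapM, List.length_reverse]
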